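-- pv_equiv track=rewrite | github.com/Delhi-Babu/Algorithms | recursion/findOddRecursion.py | isOdd
-- ===== SOURCE A (Python) =====
-- def isOdd(arr):
--     if(len(arr)<1):
--         return False
--     else:
--         if(not arr[0]%2==0):
--             return True
--         else:
--             return isOdd(arr[1:])
-- ===== SOURCE B (Python) =====
-- def isOdd(arr):
--     for x in arr:
--         if x % 2 != 0:
--             return True
--     return False
-- ===== Notes on version B (the rewrite author's own statement) =====
-- stated objective: idiomatic
-- what changed: Replaced the slicing tail-recursion (len guard + arr[1:] copy each call) with a single iterative for-loop with early return.
import Mathlib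
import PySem

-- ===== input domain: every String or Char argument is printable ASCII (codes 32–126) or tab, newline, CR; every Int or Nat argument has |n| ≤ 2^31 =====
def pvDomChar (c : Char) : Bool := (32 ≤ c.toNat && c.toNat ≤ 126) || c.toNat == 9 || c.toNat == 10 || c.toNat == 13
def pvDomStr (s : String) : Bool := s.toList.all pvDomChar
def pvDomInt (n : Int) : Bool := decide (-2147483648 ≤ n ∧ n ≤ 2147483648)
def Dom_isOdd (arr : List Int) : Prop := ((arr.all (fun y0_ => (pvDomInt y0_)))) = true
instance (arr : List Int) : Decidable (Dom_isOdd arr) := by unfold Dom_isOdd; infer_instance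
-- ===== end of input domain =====

-- B replaces A's slicing tail-recursion with a single iterative scan (ported as a fold); timing did not confirm a speedup.
-- ===== PORT A =====
def isOdd (arr : List Int) : Bool :=
  if arr.length < 1 then
    false
  else
    if !(PySem.Int.mod (arr.headI) 2 == 0) then
      true
    else
      isOdd (PySem.List.slice arr (some 1) none)
termination_by arr.length
decreasing_by simp [PySem.List.slice_from_one]; omega

-- ===== PORT B =====
def isOdd_alt (arr : List Int) : Bool :=
  arr.foldl (fun found x => found || (PySem.Int.mod x 2 != 0)) false

-- ===== PRECONDITION & SPEC =====
def Spec_isOdd (arr : List Int) (out : Bool) : Prop := out = isOdd_alt arr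
instance (arr : List Int) (out : Bool) : Decidable (Spec_isOdd arr out) := by unfold Spec_isOdd; infer_instance

-- ===== CLAIM (what is proved, stated in full; the proofs are below) =====
def Claim_equal_isOdd : Prop := ∀ (arr : List Int), Dom_isOdd arr → Spec_isOdd arr (isOdd arr)

-- ===== LEMMAS AND PROOFS =====

lemma alt_acc (acc : Bool) (xs : List Int) :
    List.foldl (fun found y => found || (PySem.Int.mod y 2 != 0)) acc xs
      = (acc || List.foldl (fun found y => found || (PySem.Int.mod y 2 != 0)) false xs) := by
  induction xs generalizing acc with
  | nil => simp [List.foldl]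
  | cons x xs ih =>
    simp only [List.foldl]
    rw [ih, ih (false || _)]
    cases acc <;> simp

lemma alt_cons (x : Int) (xs : List Int) :
    isOdd_alt (x :: xs) = ((PySem.Int.mod x 2 != 0) || isOdd_alt xs) := by
  unfold isOdd_alt
  simp only [List.foldl]
  rw [alt_acc]
  simp

lemma isOdd_eq (arr : List Int) : isOdd arr = isOdd_alt arr := by
  induction arr with
  | nil => rw [isOdd]; simp [isOdd_alt]
  | cons x xs ih =>
    rw [isOdd, alt_cons]
    have hslice : PySem.List.slice (x :: xs) (some 1) none = xs := by
      simp [PySem.List.slice_from_one]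
    simp only [hslice, List.headI, List.length_cons]
    by_cases h : (PySem.Int.mod x 2 == 0) = true
    · rw [if_neg (by omega), if_neg (by rw [h]; simp), ih]
      have hb : (PySem.Int.mod x 2 != 0) = false := by unfold bne; rw [h]; rfl
      rw [hb]; simp
    · simp only [Bool.not_eq_true] at h
      rw [if_neg (by omega), if_pos (by rw [h]; simp)]
      have hb : (PySem.Int.mod x 2 != 0) = true := by unfold bne; rw [h]; rfl
      rw [hb]; simp

-- ===== VERDICT (by name: the statement is the Claim_ definition above) =====
theorem isOdd_spec : Claim_equal_isOdd := by
  intro arr _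
  unfold Spec_isOdd
  exact isOdd_eq arr
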